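-- pv_equiv track=rewrite | github.com/kutO-O/digital-being | core/memory_consolidation.py | _prune_memory
-- ===== SOURCE A (Python) =====
-- from typing import TYPE_CHECKING, Dict, Any, List, Optional
--
-- def _prune_memory(episodes: List[dict]) -> int:
--     """Prune redundant memories."""
--     # Simple pruning: remove very similar consecutive episodes
--     pruned = 0
--
--     # Group by event_type
--     by_type: Dict[str, List[dict]] = {}
--     for ep in episodes:
--         et = ep.get("event_type", "unknown")
--         if et not in by_type:
--             by_type[et] = []
--         by_type[et].append(ep)
--
--     # For each type, keep only unique descriptions
--     for event_type, eps in by_type.items():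
--         if len(eps) <= 1:
--             continue
--
--         seen_descriptions = set()
--         for ep in eps:
--             desc = ep.get("description", "")
--             if desc in seen_descriptions:
--                 # Mark for pruning (in practice, would delete)
--                 pruned += 1
--             else:
--                 seen_descriptions.add(desc)
--
--     return pruned
-- ===== SOURCE B (Python) =====
-- def _prune_memory(episodes):
--     """Prune redundant memories."""
--     pruned = 0
--     seen = set()
--     for ep in episodes:
--         key = (ep.get("event_type", "unknown"), ep.get("description", ""))
--         if key in seen:
--             pruned += 1
--         else:
--             seen.add(key)
--     return pruned
-- ===== Notes on version B (the rewrite author's own statement) =====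
-- stated objective: simpler
-- what changed: Replaced the two-phase group-by-event-type dict of lists plus nested per-group duplicate scan with a single pass over episodes that tracks one set of (event_type, description) composite keys and counts repeats.
import Mathlib
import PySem

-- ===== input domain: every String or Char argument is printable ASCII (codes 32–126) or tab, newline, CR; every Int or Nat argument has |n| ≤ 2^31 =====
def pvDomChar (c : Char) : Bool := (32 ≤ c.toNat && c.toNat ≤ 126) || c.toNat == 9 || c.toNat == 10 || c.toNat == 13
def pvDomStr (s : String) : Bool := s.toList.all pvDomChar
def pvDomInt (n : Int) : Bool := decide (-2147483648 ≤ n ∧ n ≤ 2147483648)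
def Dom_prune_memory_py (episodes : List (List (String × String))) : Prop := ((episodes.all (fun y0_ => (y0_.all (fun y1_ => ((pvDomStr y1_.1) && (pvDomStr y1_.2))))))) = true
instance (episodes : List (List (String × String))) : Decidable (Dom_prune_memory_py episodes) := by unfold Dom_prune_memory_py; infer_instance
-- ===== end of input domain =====

-- B replaces A's group-by-event_type dict plus nested per-group duplicate scan by one pass
-- over episodes with a single set of (event_type, description) keys; same return value, simpler.
-- ===== PORT A =====

-- shared helper: ep.get(k, dflt) on the association-list encoding of a Python dict (first match)
def pvGet (ep : List (String × String)) (k dflt : String) : String :=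
  match ep.find? (fun p => p.1 == k) with
  | some p => p.2
  | none => dflt

def prune_memory_py (episodes : List (List (String × String))) : Int :=
  -- Group by event_type
  let by_type : PySem.Dict String (List (List (String × String))) :=
    episodes.foldl (fun d ep =>
      let et := pvGet ep "event_type" "unknown"
      let d := if d.contains et then d else d.insert et []
      d.modify et [] (fun l => l ++ [ep])) PySem.Dict.empty
  -- For each type, keep only unique descriptions
  by_type.items.foldl (fun pruned p =>
    if p.2.length ≤ 1 then pruned
    else (p.2.foldl (fun (st : PySem.Set String × Int) ep =>
            if PySem.Set.contains st.1 (pvGet ep "description" "") then (st.1, st.2 + 1)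
            else (PySem.Set.add st.1 (pvGet ep "description" ""), st.2))
          (PySem.Set.empty, pruned)).2) 0

-- ===== PORT B =====

def prune_memory_py_alt (episodes : List (List (String × String))) : Int :=
  (episodes.foldl (fun (st : PySem.Set (String × String) × Int) ep =>
      if PySem.Set.contains st.1 (pvGet ep "event_type" "unknown", pvGet ep "description" "") then
        (st.1, st.2 + 1)
      else
        (PySem.Set.add st.1 (pvGet ep "event_type" "unknown", pvGet ep "description" ""), st.2))
    (PySem.Set.empty, 0)).2

-- ===== PRECONDITION & SPEC =====

def Spec_prune_memory_py (episodes : List (List (String × String))) (out : Int) : Prop :=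
  out = prune_memory_py_alt episodes

instance (episodes : List (List (String × String))) (out : Int) : Decidable (Spec_prune_memory_py episodes out) := by
  unfold Spec_prune_memory_py; infer_instance

-- ===== CLAIM =====

def Claim_equal_prune_memory_py : Prop :=
  ∀ (episodes : List (List (String × String))), Dom_prune_memory_py episodes →
    Spec_prune_memory_py episodes (prune_memory_py episodes)

-- ===== LEMMAS AND PROOFS =====

-- the 'ensure key, then append' step of A's grouping loop is a plain Dict.modify
lemma pv_step_modify {γ : Type} (d : PySem.Dict String (List γ)) (k : String) (f : List γ → List γ) :
    (if d.contains k then d else d.insert k []).modify k [] f = d.modify k [] f := by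
  by_cases h : d.contains k
  · simp [h]
  · have hg : d.getD k [] = [] := by
      simp [PySem.Dict.getD, (PySem.Dict.get?_eq_none_iff_contains d k).2 (by simpa using h)]
    rw [if_neg (by simpa using h), PySem.Dict.modify, PySem.Dict.modify,
      PySem.Dict.getD_insert_self, PySem.Dict.insert_insert_self, hg]

-- a 'seen'-set duplicate-counting fold, generically
lemma pv_seen_fold {α β : Type} [BEq β] [LawfulBEq β] (f : α → β) (xs : List α)
    (s : PySem.Set β) (p : Int) :
    (xs.foldl (fun (st : PySem.Set β × Int) x =>
        if PySem.Set.contains st.1 (f x) then (st.1, st.2 + 1)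
        else (PySem.Set.add st.1 (f x), st.2)) (s, p)).2
      = p + xs.length - (PySem.Set.update s (xs.map f)).length + s.length := by
  induction xs generalizing s p with
  | nil => simp [PySem.Set.update]
  | cons x xs ih =>
    simp only [List.foldl_cons, List.map_cons]
    by_cases h : PySem.Set.contains s (f x)
    · rw [if_pos h, ih]
      have : PySem.Set.update s (f x :: xs.map f) = PySem.Set.update (PySem.Set.add s (f x)) (xs.map f) := rfl
      rw [this]
      have : PySem.Set.add s (f x) = s := by rw [PySem.Set.add, if_pos h]
      rw [this]; push_cast [List.length_cons]; ring
    · rw [if_neg h, ih]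
      have h1 : PySem.Set.update s (f x :: xs.map f) = PySem.Set.update (PySem.Set.add s (f x)) (xs.map f) := rfl
      have h2 : (PySem.Set.add s (f x)).length = s.length + 1 := by
        rw [PySem.Set.add, if_neg h, List.length_append, List.length_singleton]
      rw [h1, h2]; push_cast [List.length_cons]; ring

lemma pv_seen_fold_empty {α β : Type} [BEq β] [LawfulBEq β] (f : α → β) (xs : List α) (p : Int) :
    (xs.foldl (fun (st : PySem.Set β × Int) x =>
        if PySem.Set.contains st.1 (f x) then (st.1, st.2 + 1)
        else (PySem.Set.add st.1 (f x), st.2)) (PySem.Set.empty, p)).2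
      = p + xs.length - (PySem.Set.ofList (xs.map f)).length := by
  rw [pv_seen_fold]
  simp [PySem.Set.empty, PySem.Set.update, PySem.Set.ofList]

-- length of the distinct-element list as a Finset card
lemma pv_ofList_length {β : Type} [BEq β] [LawfulBEq β] [DecidableEq β] (m : List β) :
    (PySem.Set.ofList m).length = m.toFinset.card := by
  have hnd : (PySem.Set.ofList m).Nodup := PySem.Set.nodup_ofList m
  have : (PySem.Set.ofList m).toFinset = m.toFinset := by
    ext a; simp [List.mem_toFinset, PySem.Set.mem_ofList]
  rw [← this, List.toFinset_card_of_nodup hnd]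

lemma pv_toFinset_map_inj {β γ : Type} [DecidableEq β] [DecidableEq γ] (h : β → γ)
    (hinj : Function.Injective h) (m : List β) :
    (m.map h).toFinset.card = m.toFinset.card := by
  have : (m.map h).toFinset = m.toFinset.image h := by
    ext a; simp
  rw [this, Finset.card_image_of_injective _ hinj]

-- the grand group-by identity: summing (size − #distinct descriptions) over the groups
-- equals (total size − #distinct composite keys)
lemma pv_grand {α β γ : Type} [BEq β] [LawfulBEq β] [DecidableEq β]
    [BEq γ] [LawfulBEq γ] [DecidableEq γ] (f : α → β) (g : α → γ) :
    ∀ (S : List β) (l : List α), S.Nodup → (∀ x ∈ l, f x ∈ S) →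
      (S.map (fun a => ((l.filter (fun x => f x == a)).length : Int)
          - ((PySem.Set.ofList ((l.filter (fun x => f x == a)).map g)).length : Int))).sum
        = (l.length : Int) - ((PySem.Set.ofList (l.map (fun x => (f x, g x)))).length : Int) := by
  intro S
  induction S with
  | nil =>
    intro l _ hcov
    have : l = [] := List.eq_nil_iff_forall_not_mem.mpr (fun x hx => by simpa using hcov x hx)
    simp [this, PySem.Set.ofList, PySem.Set.empty]
  | cons a S ih =>
    intro l hnd hcov
    have hna : a ∉ S := (List.nodup_cons.1 hnd).1
    have hndS : S.Nodup := (List.nodup_cons.1 hnd).2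
    set l' := l.filter (fun x => !(f x == a)) with hl'
    -- terms over S only see the part of l with f x ≠ a
    have hterms : ∀ b ∈ S, l.filter (fun x => f x == b) = l'.filter (fun x => f x == b) := by
      intro b hb
      rw [hl', List.filter_filter]
      apply List.filter_congr
      intro x hx
      cases hfa : (f x == a) with
      | false => simp
      | true =>
        have hbf : (f x == b) = false := by
          cases hfb : (f x == b) with
          | false => rfl
          | true => exact absurd (((beq_iff_eq.1 hfb).symm.trans (beq_iff_eq.1 hfa)) ▸ hb) hna
        simp [hbf]
    have hmapcongr : (S.map (fun b => ((l.filter (fun x => f x == b)).length : Int)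
          - ((PySem.Set.ofList ((l.filter (fun x => f x == b)).map g)).length : Int))).sum
        = (S.map (fun b => ((l'.filter (fun x => f x == b)).length : Int)
          - ((PySem.Set.ofList ((l'.filter (fun x => f x == b)).map g)).length : Int))).sum := by
      congr 1
      apply List.map_congr_left
      intro b hb
      rw [hterms b hb]
    have hcov' : ∀ x ∈ l', f x ∈ S := by
      intro x hx
      rw [hl', List.mem_filter] at hx
      rcases List.mem_cons.1 (hcov x hx.1) with h | h
      · exact absurd (beq_iff_eq.2 h) (by simpa using hx.2)
      · exact h
    -- split the lengths
    have hlen : l.length = (l.filter (fun x => f x == a)).length + l'.length := by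
      rw [hl']
      have := List.length_eq_length_filter_add (l := l) (fun x => f x == a)
      omega
    -- split the distinct composite keys
    have hkeys : (l.map (fun x => (f x, g x))).toFinset.card
        = ((l.filter (fun x => f x == a)).map g).toFinset.card
          + (l'.map (fun x => (f x, g x))).toFinset.card := by
      have hsplit : (l.map (fun x => (f x, g x))).toFinset
          = ((l.filter (fun x => f x == a)).map (fun x => (f x, g x))).toFinset
            ∪ (l'.map (fun x => (f x, g x))).toFinset := by
        ext k
        simp only [Finset.mem_union, List.mem_toFinset, List.mem_map, List.mem_filter, hl']
        constructor
        · rintro ⟨x, hx, rfl⟩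
          by_cases hfa : (f x == a) = true
          · exact Or.inl ⟨x, ⟨hx, hfa⟩, rfl⟩
          · exact Or.inr ⟨x, ⟨hx, by simpa using hfa⟩, rfl⟩
        · rintro (⟨x, hx, rfl⟩ | ⟨x, hx, rfl⟩)
          · exact ⟨x, hx.1, rfl⟩
          · exact ⟨x, hx.1, rfl⟩
      have hdisj : Disjoint ((l.filter (fun x => f x == a)).map (fun x => (f x, g x))).toFinset
          (l'.map (fun x => (f x, g x))).toFinset := by
        rw [Finset.disjoint_left]
        rintro k hk1 hk2
        simp only [List.mem_toFinset, List.mem_map, List.mem_filter, hl'] at hk1 hk2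
        rcases hk1 with ⟨x, hx, rfl⟩
        rcases hk2 with ⟨y, hy, hxy⟩
        have h1 : f x = a := beq_iff_eq.1 hx.2
        have h2 : f y = f x := congrArg Prod.fst hxy
        have : (f y == a) = true := beq_iff_eq.2 (h2.trans h1)
        simp [this] at hy
      rw [hsplit, Finset.card_union_of_disjoint hdisj]
      congr 1
      -- on the f = a part, the composite key is (a, ·), injective in the description
      have heqmap : (l.filter (fun x => f x == a)).map (fun x => (f x, g x))
          = ((l.filter (fun x => f x == a)).map g).map (fun c => (a, c)) := by
        rw [List.map_map]
        apply List.map_congr_left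
        intro x hx
        have : f x = a := beq_iff_eq.1 (List.mem_filter.1 hx).2
        simp [this]
      rw [heqmap, pv_toFinset_map_inj (fun c => (a, c)) (fun c d h => by simpa using h)]
    have hrec := ih l' hndS hcov'
    rw [List.map_cons, List.sum_cons, hmapcongr, hrec,
      pv_ofList_length, pv_ofList_length, pv_ofList_length, hkeys]
    push_cast
    omega

-- each group term, with the harmless `len(eps) <= 1: continue` branch folded into the formula
lemma pv_group_term (eps : List (List (String × String))) (pruned : Int) :
    (if eps.length ≤ 1 then pruned
      else (eps.foldl (fun (st : PySem.Set String × Int) ep =>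
              if PySem.Set.contains st.1 (pvGet ep "description" "") then (st.1, st.2 + 1)
              else (PySem.Set.add st.1 (pvGet ep "description" ""), st.2))
            (PySem.Set.empty, pruned)).2)
    = pruned + (eps.length : Int)
        - ((PySem.Set.ofList (eps.map (fun ep => pvGet ep "description" ""))).length : Int) := by
  by_cases h : eps.length ≤ 1
  · rw [if_pos h]
    match eps, h with
    | [], _ => simp [PySem.Set.ofList, PySem.Set.empty]
    | [e], _ => simp [PySem.Set.ofList, PySem.Set.empty, PySem.Set.add, PySem.Set.contains]
  · rw [if_neg h, pv_seen_fold_empty]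

-- A's grouping loop characterised: items of by_type are the first-occurrence-ordered
-- event types, each paired with the order-preserving filter of its episodes
lemma pv_bytype_items (episodes : List (List (String × String))) :
    (episodes.foldl (fun d ep =>
        let et := pvGet ep "event_type" "unknown"
        let d := if d.contains et then d else d.insert et []
        d.modify et [] (fun l => l ++ [ep])) PySem.Dict.empty).items
      = (PySem.Set.ofList (episodes.map (fun ep => pvGet ep "event_type" "unknown"))).map
          (fun a => (a, episodes.filter (fun ep => pvGet ep "event_type" "unknown" == a))) := by
  have hstep : (fun (d : PySem.Dict String (List (List (String × String)))) ep =>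
      let et := pvGet ep "event_type" "unknown"
      let d := if d.contains et then d else d.insert et []
      d.modify et [] (fun l => l ++ [ep]))
    = (fun d ep => d.modify (pvGet ep "event_type" "unknown") [] (fun l => l ++ [ep])) := by
    funext d ep
    exact pv_step_modify d _ _
  rw [hstep]
  have hkeys : (episodes.foldl
      (fun d ep => d.modify (pvGet ep "event_type" "unknown") [] (fun l => l ++ [ep]))
      PySem.Dict.empty).keys
      = PySem.Set.ofList (episodes.map (fun ep => pvGet ep "event_type" "unknown")) := by
    rw [PySem.Dict.keys_foldl_modify_key episodes (fun ep => pvGet ep "event_type" "unknown")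
      [] (fun _ ep => fun l => l ++ [ep]) PySem.Dict.empty]
    rfl
  have hnodup : (episodes.foldl
      (fun d ep => d.modify (pvGet ep "event_type" "unknown") [] (fun l => l ++ [ep]))
      PySem.Dict.empty).keys.Nodup :=
    PySem.Dict.nodup_keys_foldl_modify_key episodes (fun ep => pvGet ep "event_type" "unknown")
      [] (fun _ ep => fun l => l ++ [ep]) PySem.Dict.empty (by simp [PySem.Dict.empty, PySem.Dict.keys])
  rw [PySem.Dict.items_eq_map_keys _ hnodup [], hkeys]
  apply List.map_congr_left
  intro a _
  congr 1
  have hfold : episodes.foldl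
      (fun d ep => d.modify (pvGet ep "event_type" "unknown") [] (fun l => l ++ [ep]))
      PySem.Dict.empty
      = (episodes.map (fun ep => (pvGet ep "event_type" "unknown", ep))).foldl
          (fun d p => d.modify p.1 [] (fun l => l ++ [p.2])) PySem.Dict.empty := by
    rw [List.foldl_map]
  rw [hfold, PySem.Dict.getD_foldl_modify_append, List.filter_map]
  simp only [List.map_map]
  simp [PySem.Dict.empty, PySem.Dict.getD, PySem.Dict.get?, Function.comp_def]

-- ===== VERDICT =====

theorem prune_memory_py_spec : Claim_equal_prune_memory_py := by
  unfold Claim_equal_prune_memory_py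
  intro episodes _
  unfold Spec_prune_memory_py prune_memory_py prune_memory_py_alt
  rw [pv_seen_fold_empty (fun ep => (pvGet ep "event_type" "unknown", pvGet ep "description" ""))]
  simp only [pv_bytype_items]
  rw [List.foldl_map]
  have hterm : ∀ (pruned : Int) (a : String),
      (fun (pruned : Int) p =>
        if List.length (Prod.snd p) ≤ 1 then pruned
        else (List.foldl (fun (st : PySem.Set String × Int) ep =>
                if PySem.Set.contains st.1 (pvGet ep "description" "") then (st.1, st.2 + 1)
                else (PySem.Set.add st.1 (pvGet ep "description" ""), st.2))
              (PySem.Set.empty, pruned) p.2).2) pruned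
          (a, episodes.filter (fun ep => pvGet ep "event_type" "unknown" == a))
      = pruned
        + (((episodes.filter (fun ep => pvGet ep "event_type" "unknown" == a)).length : Int)
          - ((PySem.Set.ofList ((episodes.filter
              (fun ep => pvGet ep "event_type" "unknown" == a)).map
                (fun ep => pvGet ep "description" ""))).length : Int)) := by
    intro pruned a
    have := pv_group_term (episodes.filter (fun ep => pvGet ep "event_type" "unknown" == a)) pruned
    simpa [add_sub_assoc] using this
  have hfold2 : (PySem.Set.ofList (episodes.map (fun ep => pvGet ep "event_type" "unknown"))).foldl
      (fun (pruned : Int) a =>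
        (fun (pruned : Int) p =>
          if List.length (Prod.snd p) ≤ 1 then pruned
          else (List.foldl (fun (st : PySem.Set String × Int) ep =>
                  if PySem.Set.contains st.1 (pvGet ep "description" "") then (st.1, st.2 + 1)
                  else (PySem.Set.add st.1 (pvGet ep "description" ""), st.2))
                (PySem.Set.empty, pruned) p.2).2) pruned
            (a, episodes.filter (fun ep => pvGet ep "event_type" "unknown" == a))) 0
      = ((PySem.Set.ofList (episodes.map (fun ep => pvGet ep "event_type" "unknown"))).map
          (fun a => ((episodes.filter (fun ep => pvGet ep "event_type" "unknown" == a)).length : Int)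
            - ((PySem.Set.ofList ((episodes.filter
                (fun ep => pvGet ep "event_type" "unknown" == a)).map
                  (fun ep => pvGet ep "description" ""))).length : Int))).sum := by
    have := PySem.List.foldl_add
      (PySem.Set.ofList (episodes.map (fun ep => pvGet ep "event_type" "unknown")))
      (fun a => ((episodes.filter (fun ep => pvGet ep "event_type" "unknown" == a)).length : Int)
        - ((PySem.Set.ofList ((episodes.filter
            (fun ep => pvGet ep "event_type" "unknown" == a)).map
              (fun ep => pvGet ep "description" ""))).length : Int)) 0
    rw [PySem.List.foldl_congr_mem _ _ _ 0 (fun acc x _ => hterm acc x), this, zero_add]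
  rw [hfold2, pv_grand (fun ep => pvGet ep "event_type" "unknown")
      (fun ep => pvGet ep "description" "")
      (PySem.Set.ofList (episodes.map (fun ep => pvGet ep "event_type" "unknown"))) episodes
      (PySem.Set.nodup_ofList _)
      (fun x hx => (PySem.Set.mem_ofList _ _).2 (List.mem_map_of_mem hx))]
  ring
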